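-- pv_equiv track=rewrite | github.com/hysaryn/multi-agent-flood-prediction-communication | backend/app/services/risk_overview_agent.py | _get_max_certainty
-- ===== SOURCE A (Python) =====
-- from typing import Dict, List, Optional, Tuple
--
-- def _get_max_certainty(certainty_levels: List[str]) -> str:
--     """Get the highest certainty level from a list."""
--     certainty_hierarchy = ["none", "unlikely", "possible", "likely", "certain"]
--     max_certainty = "none"
--     for certainty in certainty_levels:
--         if certainty in certainty_hierarchy:
--             if certainty_hierarchy.index(certainty) > certainty_hierarchy.index(max_certainty):
--                 max_certainty = certainty
--     return max_certainty
-- ===== SOURCE B (Python) =====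
-- def _get_max_certainty(certainty_levels):
--     """Get the highest certainty level from a list."""
--     for level in reversed(["none", "unlikely", "possible", "likely", "certain"]):
--         if level in certainty_levels:
--             return level
--     return "none"
-- ===== Notes on version B (the rewrite author's own statement) =====
-- stated objective: idiomatic
-- what changed: B scans the fixed hierarchy from highest to lowest priority and returns the first level present in the input (early exit), instead of A's running-maximum loop over the input with repeated list.index rank comparisons.
import Mathlib
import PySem

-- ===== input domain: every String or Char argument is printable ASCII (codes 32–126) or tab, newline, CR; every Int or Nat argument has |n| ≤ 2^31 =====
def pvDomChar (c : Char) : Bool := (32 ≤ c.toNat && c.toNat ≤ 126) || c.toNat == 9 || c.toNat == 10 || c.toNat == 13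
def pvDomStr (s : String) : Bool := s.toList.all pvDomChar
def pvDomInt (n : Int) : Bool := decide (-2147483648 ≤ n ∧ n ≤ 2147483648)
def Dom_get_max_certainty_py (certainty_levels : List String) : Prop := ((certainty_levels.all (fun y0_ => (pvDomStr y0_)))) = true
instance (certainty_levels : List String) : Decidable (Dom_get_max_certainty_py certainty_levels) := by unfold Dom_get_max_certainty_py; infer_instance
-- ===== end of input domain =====

-- B replaces A's running-maximum loop with an early-exit scan of the hierarchy from
-- highest to lowest priority, returning the first level present in the input (idiomatic).


-- ===== PORT A =====
-- the hierarchy list, as in A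
def pvHier : List String := ["none", "unlikely", "possible", "likely", "certain"]

-- literal port of A: a fold over the input carrying the running maximum; the
-- `.index` calls are guarded by the membership test, so `.getD 0` on the Option
-- never fires on a `none`.
def get_max_certainty_py (certainty_levels : List String) : String :=
  certainty_levels.foldl
    (fun max_certainty certainty =>
      if certainty ∈ pvHier then
        if (PySem.List.index? pvHier certainty).getD 0 >
           (PySem.List.index? pvHier max_certainty).getD 0 then certainty
        else max_certainty
      else max_certainty)
    "none"

-- ===== PORT B =====
-- literal port of B: loop over reversed(hierarchy), return the first level present
def pvAltScan (certainty_levels : List String) : List String → String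
  | [] => "none"
  | level :: rest =>
      if level ∈ certainty_levels then level else pvAltScan certainty_levels rest

def get_max_certainty_py_alt (certainty_levels : List String) : String :=
  pvAltScan certainty_levels pvHier.reverse

-- ===== PRECONDITION & SPEC =====
def Spec_get_max_certainty_py (certainty_levels : List String) (out : String) : Prop := out = get_max_certainty_py_alt certainty_levels
instance (certainty_levels : List String) (out : String) : Decidable (Spec_get_max_certainty_py certainty_levels out) := by unfold Spec_get_max_certainty_py; infer_instance

-- ===== CLAIM (what is proved, stated in full; the proofs are below) =====
def Claim_equal_get_max_certainty_py : Prop := ∀ (certainty_levels : List String), Dom_get_max_certainty_py certainty_levels → Spec_get_max_certainty_py certainty_levels (get_max_certainty_py certainty_levels)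

-- ===== LEMMAS AND PROOFS =====

-- rank of a string in the hierarchy; 0 for strings outside it
def pvIdx (s : String) : Nat :=
  if s = "certain" then 4 else if s = "likely" then 3 else if s = "possible" then 2
  else if s = "unlikely" then 1 else 0

-- canonical hierarchy string for a rank
def pvAt (n : Nat) : String :=
  if n ≥ 4 then "certain" else if n = 3 then "likely" else if n = 2 then "possible"
  else if n = 1 then "unlikely" else "none"

-- maximum rank occurring in the list
def pvM (xs : List String) : Nat := xs.foldr (fun x m => max (pvIdx x) m) 0

theorem pvIdx_le (s : String) : pvIdx s ≤ 4 := by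
  unfold pvIdx; split_ifs <;> omega

theorem pvM_le (xs : List String) : pvM xs ≤ 4 := by
  induction xs with
  | nil => simp [pvM]
  | cons x xs ih =>
      simp only [pvM, List.foldr] at *
      exact max_le (pvIdx_le x) ih

theorem pvIdx_le_pvM {x : String} {xs : List String} (h : x ∈ xs) : pvIdx x ≤ pvM xs := by
  induction xs with
  | nil => cases h
  | cons y ys ih =>
      simp only [pvM, List.foldr] at *
      rcases List.mem_cons.mp h with rfl | h
      · exact le_max_left _ _
      · exact le_trans (ih h) (le_max_right _ _)

theorem pvM_attained {xs : List String} (h : pvM xs ≠ 0) : ∃ x ∈ xs, pvIdx x = pvM xs := by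
  induction xs with
  | nil => simp [pvM] at h
  | cons y ys ih =>
      simp only [pvM, List.foldr] at *
      set M : Nat := List.foldr (fun x m => max (pvIdx x) m) 0 ys with hM
      rcases Nat.le_total (pvIdx y) M with hle | hle
      · rw [max_eq_right hle] at h ⊢
        obtain ⟨x, hx, hxi⟩ := ih h
        exact ⟨x, List.mem_cons_of_mem _ hx, hxi⟩
      · rw [max_eq_left hle]
        exact ⟨y, List.mem_cons_self, rfl⟩

theorem pvIdx_eq_iff (x : String) :
    (pvIdx x = 4 → x = "certain") ∧ (pvIdx x = 3 → x = "likely") ∧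
    (pvIdx x = 2 → x = "possible") ∧ (pvIdx x = 1 → x = "unlikely") := by
  unfold pvIdx; split_ifs with h1 h2 h3 h4 <;> refine ⟨?_, ?_, ?_, ?_⟩ <;> intro he <;>
    first | (exact absurd he (by decide)) | exact he.elim | simp_all

-- the A-side fold, starting from an arbitrary hierarchy element, computes the
-- canonical string of the max of the start rank and the list's max rank
theorem pvFoldA (xs : List String) :
    ∀ acc, acc ∈ pvHier →
      xs.foldl
        (fun max_certainty certainty =>
          if certainty ∈ pvHier then
            if (PySem.List.index? pvHier certainty).getD 0 >
               (PySem.List.index? pvHier max_certainty).getD 0 then certainty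
            else max_certainty
          else max_certainty) acc
      = pvAt (max (pvIdx acc) (pvM xs)) := by
  induction xs with
  | nil =>
      intro acc hacc
      simp only [List.foldl, pvM, List.foldr, Nat.max_zero]
      fin_cases hacc <;> decide
  | cons x xs ih =>
      intro acc hacc
      simp only [List.foldl]
      by_cases hx : x ∈ pvHier
      · -- step value is a hierarchy element with rank max (pvIdx acc) (pvIdx x)
        have key : ∀ st : String, st ∈ pvHier →
            pvIdx (if x ∈ pvHier then
              if (PySem.List.index? pvHier x).getD 0 >
                 (PySem.List.index? pvHier st).getD 0 then x else st
            else st) = max (pvIdx st) (pvIdx x) ∧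
            (if x ∈ pvHier then
              if (PySem.List.index? pvHier x).getD 0 >
                 (PySem.List.index? pvHier st).getD 0 then x else st
            else st) ∈ pvHier := by
          intro st hst
          fin_cases hst <;> fin_cases hx <;> exact ⟨by decide, by decide⟩
        obtain ⟨hidx, hmem⟩ := key acc hacc
        rw [ih _ hmem, hidx]
        have : pvM (x :: xs) = max (pvIdx x) (pvM xs) := by
          simp [pvM, List.foldr]
        rw [this]
        congr 1
        omega
      · simp only [if_neg hx]
        rw [ih acc hacc]
        have hx0 : pvIdx x = 0 := by
          unfold pvIdx
          split_ifs with h1 h2 h3 h4 <;>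
            first | rfl | (exfalso; apply hx; subst_vars; decide)
        have : pvM (x :: xs) = max (pvIdx x) (pvM xs) := by
          simp [pvM, List.foldr]
        rw [this, hx0]
        rfl

-- the B-side scan computes the canonical string of the list's max rank
theorem pvScanB (xs : List String) : pvAltScan xs pvHier.reverse = pvAt (pvM xs) := by
  have hle := pvM_le xs
  have hcert : pvM xs = 4 → "certain" ∈ xs := by
    intro h
    obtain ⟨x, hx, hxi⟩ := pvM_attained (show pvM xs ≠ 0 by omega)
    rw [h] at hxi
    rcases pvIdx_eq_iff x with ⟨h4, _⟩
    rwa [h4 hxi] at hx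
  have hlik : pvM xs = 3 → "likely" ∈ xs := by
    intro h
    obtain ⟨x, hx, hxi⟩ := pvM_attained (show pvM xs ≠ 0 by omega)
    rw [h] at hxi
    rcases pvIdx_eq_iff x with ⟨_, h3, _⟩
    rwa [h3 hxi] at hx
  have hpos : pvM xs = 2 → "possible" ∈ xs := by
    intro h
    obtain ⟨x, hx, hxi⟩ := pvM_attained (show pvM xs ≠ 0 by omega)
    rw [h] at hxi
    rcases pvIdx_eq_iff x with ⟨_, _, h2, _⟩
    rwa [h2 hxi] at hx
  have hunl : pvM xs = 1 → "unlikely" ∈ xs := by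
    intro h
    obtain ⟨x, hx, hxi⟩ := pvM_attained (show pvM xs ≠ 0 by omega)
    rw [h] at hxi
    rcases pvIdx_eq_iff x with ⟨_, _, _, h1⟩
    rwa [h1 hxi] at hx
  have hnc : "certain" ∈ xs → pvM xs = 4 := fun h =>
    le_antisymm hle (by simpa [pvIdx] using pvIdx_le_pvM h)
  have hnl : "likely" ∈ xs → 3 ≤ pvM xs := fun h => by
    simpa [pvIdx] using pvIdx_le_pvM h
  have hnp : "possible" ∈ xs → 2 ≤ pvM xs := fun h => by
    simpa [pvIdx] using pvIdx_le_pvM h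
  have hnu : "unlikely" ∈ xs → 1 ≤ pvM xs := fun h => by
    simpa [pvIdx] using pvIdx_le_pvM h
  show pvAltScan xs ["certain", "likely", "possible", "unlikely", "none"] = pvAt (pvM xs)
  simp only [pvAltScan]
  interval_cases h : pvM xs
  · rw [if_neg (fun hm => by have := hnc hm; omega),
        if_neg (fun hm => by have := hnl hm; omega),
        if_neg (fun hm => by have := hnp hm; omega),
        if_neg (fun hm => by have := hnu hm; omega)]
    split <;> decide
  · rw [if_neg (fun hm => by have := hnc hm; omega),
        if_neg (fun hm => by have := hnl hm; omega),
        if_neg (fun hm => by have := hnp hm; omega),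
        if_pos (hunl rfl)]
    decide
  · rw [if_neg (fun hm => by have := hnc hm; omega),
        if_neg (fun hm => by have := hnl hm; omega),
        if_pos (hpos rfl)]
    decide
  · rw [if_neg (fun hm => by have := hnc hm; omega),
        if_pos (hlik rfl)]
    decide
  · rw [if_pos (hcert rfl)]
    decide

-- ===== VERDICT (by name: the statement is the Claim_ definition above) =====
theorem get_max_certainty_py_spec : Claim_equal_get_max_certainty_py := by
  intro xs _
  show get_max_certainty_py xs = get_max_certainty_py_alt xs
  rw [get_max_certainty_py, get_max_certainty_py_alt, pvScanB,
      pvFoldA xs "none" (by decide)]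
  have : pvIdx "none" = 0 := by decide
  rw [this, Nat.zero_max]
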